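-- pv_equiv track=rewrite | github.com/rolandgriggs/be434-Spring2025 | assignments/10_conserved/conserved.py | find_conserved
-- ===== SOURCE A (Python) =====
-- def find_conserved(sequences):
--     """Find conserved bases across sequences"""
--
--     conserved_line = []
--
--     # For each position in the sequences
--     for i in range(len(sequences[0])):  # All sequences are assumed to have the same length
--         # Get the base at the current position for all
--         column = [seq[i] for seq in sequences]
--
--         # Check if all bases are the same
--         if len(set(column)) == 1:
--             conserved_line.append('|')
--         else:
--             conserved_line.append('X')
--
--     return ''.join(conserved_line)
-- ===== SOURCE B (Python) =====
-- def find_conserved(sequences):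
--     """Find conserved bases across sequences"""
--     ref = sequences[0]
--     result = ['|'] * len(ref)
--     for seq in sequences[1:]:
--         for i in range(len(ref)):
--             if seq[i] != ref[i]:
--                 result[i] = 'X'
--     return ''.join(result)
-- ===== Notes on version B (the rewrite author's own statement) =====
-- stated objective: alternative
-- what changed: B replaces A's per-column set construction (build column list, hash it into a set, test its size) with a row-by-row scan that keeps a mutable conservation mask of '|' and stamps 'X' wherever a row disagrees with the first sequence.
import Mathlib
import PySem

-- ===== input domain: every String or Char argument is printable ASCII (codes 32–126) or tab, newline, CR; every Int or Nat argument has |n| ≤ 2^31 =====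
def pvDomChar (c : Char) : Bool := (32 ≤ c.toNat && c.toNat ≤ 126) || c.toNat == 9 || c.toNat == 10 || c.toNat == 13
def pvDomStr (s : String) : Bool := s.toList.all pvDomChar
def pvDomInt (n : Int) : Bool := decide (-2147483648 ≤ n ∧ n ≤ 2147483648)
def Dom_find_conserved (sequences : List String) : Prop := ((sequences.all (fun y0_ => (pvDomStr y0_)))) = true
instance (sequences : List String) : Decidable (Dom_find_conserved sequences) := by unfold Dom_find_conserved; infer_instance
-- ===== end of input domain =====

-- B replaces A's per-column set-building with a row-by-row scan that mutates a
-- conservation mask in place (objective: alternative decomposition, same cost).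

-- ===== PORT A =====
def find_conserved (sequences : List String) : String :=
  let s0 := (PySem.List.pyGet? sequences 0).getD ""
  let conserved_line := (PySem.List.pyRange 0 (PySem.Str.len s0) 1).foldl
    (fun acc i =>
      let column := sequences.map (fun seq => (PySem.Str.pyGet? seq i).getD ' ')
      if PySem.Set.len (PySem.Set.ofList column) = 1 then acc ++ ['|'] else acc ++ ['X'])
    []
  String.mk conserved_line

-- ===== PORT B =====
def find_conserved_alt (sequences : List String) : String :=
  let ref := (PySem.List.pyGet? sequences 0).getD ""
  let n := PySem.Str.len ref
  let result := (PySem.List.slice sequences (some 1) none).foldl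
    (fun res seq =>
      (PySem.List.pyRange 0 n 1).foldl
        (fun res i =>
          if (PySem.Str.pyGet? seq i).getD ' ' ≠ (PySem.Str.pyGet? ref i).getD ' '
          then PySem.List.pySetD res i 'X' else res)
        res)
    (List.replicate n.toNat '|')
  String.mk result

-- ===== PRECONDITION & SPEC =====
-- A raises IndexError when sequences is empty (sequences[0]) or when some sequence is
-- shorter than the first (seq[i]); B raises there too, but we exclude those inputs.
def Pre_find_conserved (sequences : List String) : Prop :=
  sequences ≠ [] ∧ ∀ s ∈ sequences, (sequences.headD "").toList.length ≤ s.toList.length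
instance (sequences : List String) : Decidable (Pre_find_conserved sequences) := by
  unfold Pre_find_conserved; infer_instance
def pvWitness_find_conserved : List String := ["ACGT", "AGGT", "ACGA"]

def Spec_find_conserved (sequences : List String) (out : String) : Prop := out = find_conserved_alt sequences
instance (sequences : List String) (out : String) : Decidable (Spec_find_conserved sequences out) := by unfold Spec_find_conserved; infer_instance

-- ===== CLAIM (what is proved, stated in full; the proofs are below) =====
def Claim_equal_find_conserved : Prop := ∀ (sequences : List String), Dom_find_conserved sequences → Pre_find_conserved sequences → Spec_find_conserved sequences (find_conserved sequences)

-- ===== LEMMAS AND PROOFS =====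

-- the character seq[k] as both ports read it (total form, valid under Pre_)
def pvCh (s : String) (k : Nat) : Char := (s.toList[k]?).getD ' '

theorem pvCh_eq (s : String) (k : Nat) :
    (PySem.Str.pyGet? s ((k : Nat) : Int)).getD ' ' = pvCh s k := by
  simp [pvCh]

-- a Python set built from a nonempty list has exactly one element iff all elements equal the first
theorem set_len_one_iff (x : Char) (l : List Char) :
    PySem.Set.len (PySem.Set.ofList (x :: l)) = 1 ↔ ∀ y ∈ l, y = x := by
  have hx : x ∈ PySem.Set.ofList (x :: l) := (PySem.Set.mem_ofList _ _).mpr List.mem_cons_self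
  have hnd := PySem.Set.nodup_ofList (x :: l)
  unfold PySem.Set.len
  constructor
  · intro h y hy
    have hlen : (PySem.Set.ofList (x :: l)).length = 1 := by exact_mod_cast h
    obtain ⟨a, ha⟩ := List.length_eq_one_iff.mp hlen
    have hy' : y ∈ PySem.Set.ofList (x :: l) :=
      (PySem.Set.mem_ofList _ _).mpr (List.mem_cons_of_mem _ hy)
    rw [ha] at hx hy'
    simp at hx hy'
    rw [hy', hx]
  · intro h
    have hsub : ∀ y ∈ PySem.Set.ofList (x :: l), y = x := by
      intro y hy
      rcases List.mem_cons.mp ((PySem.Set.mem_ofList _ _).mp hy) with h0 | h1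
      · exact h0
      · exact h _ h1
    have hone : PySem.Set.ofList (x :: l) = [x] := by
      cases hS : PySem.Set.ofList (x :: l) with
      | nil => rw [hS] at hx; cases hx
      | cons a t =>
        rw [hS] at hsub hnd
        have ha : a = x := hsub a List.mem_cons_self
        have ht : t = [] := by
          cases t with
          | nil => rfl
          | cons b u =>
            have hb : b = x := hsub b (by simp)
            rw [ha, hb] at hnd
            simp at hnd
        rw [ha, ht]
    rw [hone]; simp

-- length is preserved through the inner index loop
theorem inner_len (c : Nat → Bool) (l : List Nat) (res : List Char) :
    (l.foldl (fun r k => if c k then r.set k 'X' else r) res).length = res.length := by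
  induction l generalizing res with
  | nil => rfl
  | cons k t ih => simp only [List.foldl_cons]; rw [ih]; split <;> simp

-- the inner loop sets exactly the flagged in-range positions
theorem inner_get (c : Nat → Bool) (l : List Nat) (res : List Char) (j : Nat)
    (hl : ∀ k ∈ l, k < res.length) :
    (l.foldl (fun r k => if c k then r.set k 'X' else r) res)[j]?
      = if j ∈ l ∧ c j = true then some 'X' else res[j]? := by
  induction l generalizing res with
  | nil => simp
  | cons k t ih =>
    have hk : k < res.length := hl k (by simp)
    have hl' : ∀ k' ∈ t, k' < (if c k then res.set k 'X' else res).length := by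
      intro k' hk'
      have := hl k' (List.mem_cons_of_mem _ hk')
      split <;> simpa
    simp only [List.foldl_cons]
    rw [ih _ hl']
    have hset : (if c k then res.set k 'X' else res)[j]? =
        if j = k ∧ c j = true then some 'X' else res[j]? := by
      by_cases hck : c k = true
      · rw [if_pos hck, List.getElem?_set]
        by_cases hkj : k = j
        · subst hkj; simp [hk, hck]
        · rw [if_neg hkj, if_neg (by rintro ⟨h1, _⟩; exact hkj h1.symm)]
      · rw [if_neg hck, if_neg (by rintro ⟨h1, h2⟩; subst h1; exact hck h2)]
    rw [hset]
    by_cases hjt : j ∈ t ∧ c j = true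
    · rw [if_pos hjt, if_pos ⟨List.mem_cons_of_mem _ hjt.1, hjt.2⟩]
    · rw [if_neg hjt]
      by_cases hjk : j = k ∧ c j = true
      · rw [if_pos hjk, if_pos ⟨by simp [hjk.1], hjk.2⟩]
      · rw [if_neg hjk, if_neg ?_]
        rintro ⟨h1, h2⟩
        rcases List.mem_cons.mp h1 with h | h
        · exact hjk ⟨h, h2⟩
        · exact hjt ⟨h, h2⟩

-- the row loop: a position ends as 'X' iff some row flags it
theorem outer_get (n : Nat) (step : String → Nat → Bool) (rest : List String)
    (res : List Char) (hres : res.length = n) (j : Nat) :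
    (rest.foldl (fun res seq =>
        (List.range n).foldl (fun r k => if step seq k then r.set k 'X' else r) res) res)[j]?
      = if j < n ∧ (rest.any fun s => step s j) = true then some 'X' else res[j]? := by
  induction rest generalizing res with
  | nil => simp
  | cons s t ih =>
    simp only [List.foldl_cons]
    have hlen1 : ((List.range n).foldl
        (fun r k => if step s k then r.set k 'X' else r) res).length = n := by
      rw [inner_len]; exact hres
    rw [ih _ hlen1, inner_get _ _ _ _ (by intro k hk; rw [hres]; simpa using hk)]
    by_cases hj : j < n <;> by_cases hs : step s j = true <;>
      by_cases ht : (t.any fun x => step x j) = true <;>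
      simp [hj, hs, ht, List.mem_range]

theorem find_conserved_spec : Claim_equal_find_conserved := by
  unfold Claim_equal_find_conserved Spec_find_conserved
  intro sequences _ hpre
  obtain ⟨hne, hlenpre⟩ := hpre
  cases sequences with
  | nil => exact absurd rfl hne
  | cons s0 rest =>
  clear hne
  have h0 : PySem.List.pyGet? (s0 :: rest) 0 = some s0 := by
    simp [PySem.List.pyGet?, PySem.List.pyIdx?]
  set n := s0.toList.length with hn
  unfold find_conserved find_conserved_alt
  rw [h0]
  simp only [Option.getD_some, PySem.Str.len_eq, ← hn, PySem.List.pyRange_one,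
    List.foldl_map, zero_add, PySem.List.pySetD_natCast, pvCh_eq,
    PySem.List.slice_from (s0 :: rest) (by norm_num : (0:Int) ≤ 1)]
  rw [show ((n : Int) - 0).toNat = n by omega, show ((n : Int)).toNat = n by omega]
  simp only [Int.toNat_one, List.drop_one, List.tail_cons]
  -- A side: fold of conditional appends = a map over range n
  have hA : (List.range n).foldl (fun acc k =>
        if PySem.Set.len (PySem.Set.ofList ((s0 :: rest).map (fun seq => pvCh seq k))) = 1
        then acc ++ ['|'] else acc ++ ['X']) []
      = (List.range n).map (fun k =>
          if (rest.all fun s => pvCh s k == pvCh s0 k) = true then '|' else 'X') := by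
    have hfun : (fun (acc : List Char) (k : Nat) =>
        if PySem.Set.len (PySem.Set.ofList ((s0 :: rest).map (fun seq => pvCh seq k))) = 1
        then acc ++ ['|'] else acc ++ ['X'])
        = (fun acc k => acc ++ [if (rest.all fun s => pvCh s k == pvCh s0 k) = true
            then '|' else 'X']) := by
      funext acc k
      simp only [List.map_cons]
      by_cases hc : (rest.all fun s => pvCh s k == pvCh s0 k) = true
      · have h1 : PySem.Set.len (PySem.Set.ofList
            (pvCh s0 k :: rest.map (fun s => pvCh s k))) = 1 := by
          refine (set_len_one_iff _ _).mpr ?_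
          intro y hy
          obtain ⟨s, hs, rfl⟩ := List.mem_map.mp hy
          simpa using List.all_eq_true.mp hc s hs
        rw [if_pos hc, if_pos h1]
      · have h1 : ¬ PySem.Set.len (PySem.Set.ofList
            (pvCh s0 k :: rest.map (fun s => pvCh s k))) = 1 := by
          intro h1
          apply hc
          refine List.all_eq_true.mpr ?_
          intro s hs
          have := (set_len_one_iff _ _).mp h1 (pvCh s k) (List.mem_map_of_mem hs)
          simpa using this
        rw [if_neg hc, if_neg h1]
    rw [hfun, PySem.List.foldl_append_singleton_eq_map, List.nil_append]
  rw [hA]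
  -- B side: rewrite the Prop-conditioned set loop into Bool-step form
  have hBfun : (fun (res : List Char) (seq : String) =>
        (List.range n).foldl (fun res k =>
          if pvCh seq k ≠ pvCh s0 k then res.set k 'X' else res) res)
      = (fun res seq => (List.range n).foldl
          (fun r k => if (pvCh seq k != pvCh s0 k) = true then r.set k 'X' else r) res) := by
    funext res seq
    congr 1
    funext r k
    simp only [bne_iff_ne]
  rw [hBfun]
  -- compare the two character lists pointwise
  congr 1
  apply List.ext_getElem?
  intro j
  rw [outer_get n (fun s k => pvCh s k != pvCh s0 k) rest _ (List.length_replicate) j]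
  by_cases hj : j < n
  · rw [List.getElem?_map, List.getElem?_range hj, Option.map_some, List.getElem?_replicate,
      if_pos hj]
    by_cases hc : (rest.all fun s => pvCh s j == pvCh s0 j) = true
    · have hno : ¬ (j < n ∧ (rest.any fun s => pvCh s j != pvCh s0 j) = true) := by
        rintro ⟨-, hany⟩
        obtain ⟨s, hs, hbne⟩ := List.any_eq_true.mp hany
        exact (bne_iff_ne.mp hbne) (by simpa using List.all_eq_true.mp hc s hs)
      rw [if_pos hc, if_neg hno]
    · have hany : (rest.any fun s => pvCh s j != pvCh s0 j) = true := by
        by_contra hnone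
        apply hc
        refine List.all_eq_true.mpr ?_
        intro s hs
        by_contra hne
        exact hnone (List.any_eq_true.mpr ⟨s, hs, bne_iff_ne.mpr (by simpa using hne)⟩)
      rw [if_neg hc, if_pos ⟨hj, hany⟩]
  · rw [List.getElem?_map]
    have hr : (List.range n)[j]? = none := by
      rw [List.getElem?_eq_none_iff]; simpa using Nat.le_of_not_lt hj
    rw [hr, Option.map_none, if_neg (by rintro ⟨h1, _⟩; exact hj h1), List.getElem?_replicate,
      if_neg hj]
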